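-- pv_equiv track=rewrite | github.com/ulrichji/WorldRegenPlugin | readIds.py | blockNameFormatter
-- ===== SOURCE A (Python) =====
-- def blockNameFormatter(value):
-- 	value = value.strip()
-- 	#Remove single letters from the right side as they are only extra information
-- 	#TODO this might only be the case for most items. I can't think of any exceptions now (and name is not critical as it is only "esthetical")
-- 	findSpecialLetters = True
-- 	while(findSpecialLetters):
-- 		spacePos = value.rfind(" ")
-- 		specialLetter = value[spacePos+1:]
--
-- 		if(len(specialLetter.strip()) == 1):
-- 			value = value[:spacePos]
-- 		else:
-- 			findSpecialLetters = False
--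
-- 	return "\""+value+"\""
-- ===== SOURCE B (Python) =====
-- def blockNameFormatter(value):
--     tokens = value.strip().split(" ")
--     while tokens and len(tokens[-1].strip()) == 1:
--         tokens.pop()
--     return '"' + " ".join(tokens) + '"'
-- ===== Notes on version B (the rewrite author's own statement) =====
-- stated objective: simpler
-- what changed: B splits the stripped string once into a list of space-separated tokens and pops trailing single-letter tokens from the list, instead of A's repeated rfind+slice re-scan of the whole string each iteration.
import Mathlib
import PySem

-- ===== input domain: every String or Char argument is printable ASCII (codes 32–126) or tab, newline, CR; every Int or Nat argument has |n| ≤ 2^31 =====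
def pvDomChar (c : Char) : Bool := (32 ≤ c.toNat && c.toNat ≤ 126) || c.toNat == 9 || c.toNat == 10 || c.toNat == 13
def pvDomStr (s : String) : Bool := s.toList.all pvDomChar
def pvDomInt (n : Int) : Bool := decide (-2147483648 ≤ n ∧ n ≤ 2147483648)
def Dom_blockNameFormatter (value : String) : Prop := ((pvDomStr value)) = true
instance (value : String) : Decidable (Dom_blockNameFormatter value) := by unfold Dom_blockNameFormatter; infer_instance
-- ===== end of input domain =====

-- B re-implements A's repeated rfind+slice re-scan as a one-time split into space-separated
-- tokens followed by popping trailing single-letter tokens; same return value, simpler shape.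

-- ===== PORT A =====
-- helper lemmas cited by aLoopA's decreasing_by (bounds of value.rfind(" "))
lemma prefix_space (l : List Char) : [' '].isPrefixOf l = true ↔ l.head? = some ' ' := by
  cases l with
  | nil => simp [List.isPrefixOf]
  | cons c r =>
    simp only [List.isPrefixOf, Bool.and_true, List.head?_cons, Option.some.injEq, beq_iff_eq]
    exact eq_comm

lemma rgo_zero (s : List Char) : PySem.Chars.rfind.go s [' '] 0 = if [' '].isPrefixOf s then 0 else -1 := by
  simp [PySem.Chars.rfind.go]

lemma rgo_succ (s : List Char) (j : Nat) : PySem.Chars.rfind.go s [' '] (j+1) = if [' '].isPrefixOf (s.drop (j+1)) then ((j:Int)+1) else PySem.Chars.rfind.go s [' '] j := by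
  simp [PySem.Chars.rfind.go]

lemma rfind_space_cases (s : List Char) : PySem.Chars.rfind s [' '] = -1 ∨ ∃ j : Nat, PySem.Chars.rfind s [' '] = (j:Int) ∧ j < s.length := by
  show PySem.Chars.rfind.go s [' '] s.length = -1 ∨ _
  have : ∀ k, k ≤ s.length → (PySem.Chars.rfind.go s [' '] k = -1 ∨ ∃ j : Nat, PySem.Chars.rfind.go s [' '] k = (j:Int) ∧ j < s.length) := by
    intro k
    induction k with
    | zero =>
      intro _
      rw [rgo_zero]
      split
      · next hp =>
        rw [prefix_space] at hp
        right; exact ⟨0, rfl, by cases s <;> simp_all⟩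
      · left; rfl
    | succ j ih =>
      intro hk
      rw [rgo_succ]
      split
      · next hp =>
        rw [prefix_space] at hp
        right
        refine ⟨j+1, by push_cast; ring, ?_⟩
        have : s.drop (j+1) ≠ [] := by intro he; rw [he] at hp; simp at hp
        exact List.length_lt_of_drop_ne_nil this
      · exact ih (by omega)
  exact this s.length le_rfl

-- the `while(findSpecialLetters)` loop of A: rfind, slice off the last word if its strip has length 1
def aLoopA (cs : List Char) : List Char :=
  let spacePos := PySem.Chars.rfind cs [' ']
  let specialLetter := PySem.Chars.slice cs (some (spacePos + 1)) none
  if h : (PySem.Chars.strip specialLetter).length = 1 then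
    aLoopA (PySem.Chars.slice cs none (some spacePos))
  else cs
termination_by cs.length
decreasing_by
  have h' : (PySem.Chars.strip (PySem.Chars.slice cs (some (PySem.Chars.rfind cs [' '] + 1)) none)).length = 1 := h
  rcases rfind_space_cases cs with h1 | ⟨j, h1, hj⟩
  · rw [h1] at h'
    rw [h1]
    have hcs : cs ≠ [] := by
      intro he
      subst he
      simp [PySem.Chars.strip, PySem.Chars.lstrip, PySem.Chars.rstrip, PySem.Chars.slice_eq_listSlice, PySem.List.slice] at h'
    simp only [PySem.Chars.slice_eq_listSlice, PySem.List.slice_to_neg_one, List.length_dropLast]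
    cases cs with
    | nil => exact absurd rfl hcs
    | cons a b => simp
  · rw [h1]
    simp only [PySem.Chars.slice_eq_listSlice, PySem.List.slice_to_natCast, List.length_take]
    omega

def blockNameFormatter (value : String) : String :=
  let v := PySem.Chars.strip value.toList
  String.ofList ('"' :: aLoopA v ++ ['"'])

-- ===== PORT B =====
-- the `while tokens and len(tokens[-1].strip()) == 1: tokens.pop()` loop of B
def popLoop (tokens : List (List Char)) : List (List Char) :=
  match hlast : tokens.getLast? with
  | none => tokens
  | some t =>
    if (PySem.Chars.strip t).length = 1 then popLoop tokens.dropLast else tokens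
termination_by tokens.length
decreasing_by
  cases tokens with
  | nil => simp at hlast
  | cons a b => simp

def blockNameFormatter_alt (value : String) : String :=
  let tokens := PySem.Chars.splitOn (PySem.Chars.strip value.toList) [' ']
  String.ofList ('"' :: PySem.Chars.join [' '] (popLoop tokens) ++ ['"'])

-- ===== PRECONDITION & SPEC =====
def Spec_blockNameFormatter (value : String) (out : String) : Prop := out = blockNameFormatter_alt value
instance (value : String) (out : String) : Decidable (Spec_blockNameFormatter value out) := by unfold Spec_blockNameFormatter; infer_instance

-- ===== CLAIM (what is proved, stated in full; the proofs are below) =====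
def Claim_equal_blockNameFormatter : Prop := ∀ (value : String), Dom_blockNameFormatter value → Spec_blockNameFormatter value (blockNameFormatter value)

-- ===== LEMMAS AND PROOFS =====

-- mathematical splitting on a single space, and its relation to PySem.Chars.splitOn
def splitSp : List Char → List (List Char)
  | [] => [[]]
  | c :: r => if c = ' ' then [] :: splitSp r else (splitSp r).modifyHead (c :: ·)

lemma splitSp_ne_nil (l : List Char) : splitSp l ≠ [] := by
  induction l with
  | nil => simp [splitSp]
  | cons c r ih =>
    simp only [splitSp]
    split
    · simp
    · cases h : splitSp r with
      | nil => exact absurd h ih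
      | cons t ts => simp [List.modifyHead]

lemma sgo_eq (l : List Char) : ∀ fuel cur acc, l.length < fuel →
    PySem.Chars.splitOn.go [' '] fuel l cur acc = acc.reverse ++ (splitSp l).modifyHead (cur.reverse ++ ·) := by
  induction l with
  | nil =>
    intro fuel cur acc hf
    match fuel with
    | f + 1 => simp [PySem.Chars.splitOn.go, splitSp, List.modifyHead]
  | cons c r ih =>
    intro fuel cur acc hf
    match fuel with
    | f + 1 =>
      simp only [PySem.Chars.splitOn.go]
      by_cases hc : c = ' '
      · subst hc
        rw [if_pos (by simp [List.isPrefixOf])]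
        rw [show List.drop [' '].length (' ' :: r) = r from rfl]
        rw [ih f [] (cur.reverse :: acc) (by simpa using hf)]
        simp only [splitSp, ite_true]
        cases h : splitSp r <;> simp [List.modifyHead]
      · rw [if_neg (by simp [List.isPrefixOf]; intro h; exact hc h.symm)]
        rw [ih f (c :: cur) acc (by simpa using hf)]
        simp only [splitSp, if_neg hc]
        cases h : splitSp r with
        | nil => exact absurd h (splitSp_ne_nil r)
        | cons t ts => simp [List.modifyHead]

lemma splitOn_space_eq (l : List Char) : PySem.Chars.splitOn l [' '] = splitSp l := by
  show PySem.Chars.splitOn.go [' '] (l.length + 1) l [] [] = _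
  rw [sgo_eq l (l.length + 1) [] [] (by omega)]
  cases h : splitSp l with
  | nil => exact absurd h (splitSp_ne_nil l)
  | cons t ts => simp [List.modifyHead]

lemma splitSp_no_space (l : List Char) (h : ' ' ∉ l) : splitSp l = [l] := by
  induction l with
  | nil => rfl
  | cons c r ih =>
    simp only [List.mem_cons, not_or] at h
    rw [splitSp, if_neg (fun hc => h.1 hc.symm), ih h.2]
    rfl

lemma splitSp_concat (pre post : List Char) (h : ' ' ∉ post) :
    splitSp (pre ++ ' ' :: post) = splitSp pre ++ [post] := by
  induction pre with
  | nil => simp [splitSp, splitSp_no_space post h]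
  | cons c r ih =>
    by_cases hc : c = ' '
    · subst hc; simp [splitSp, ih]
    · simp only [List.cons_append, splitSp, if_neg hc, ih]
      cases hs : splitSp r with
      | nil => exact absurd hs (splitSp_ne_nil r)
      | cons t ts => simp [List.modifyHead]

lemma join_splitSp (l : List Char) : PySem.Chars.join [' '] (splitSp l) = l := by
  induction l with
  | nil => rfl
  | cons c r ih =>
    by_cases hc : c = ' '
    · subst hc
      simp only [splitSp, ite_true]
      cases hs : splitSp r with
      | nil => exact absurd hs (splitSp_ne_nil r)
      | cons t ts =>
        rw [hs] at ih
        simp only [PySem.Chars.join, List.intercalate] at *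
        simpa using ih
    · simp only [splitSp, if_neg hc]
      cases hs : splitSp r with
      | nil => exact absurd hs (splitSp_ne_nil r)
      | cons t ts =>
        rw [hs] at ih
        cases ts with
        | nil => simpa [PySem.Chars.join, List.intercalate] using ih
        | cons t2 ts2 =>
          simp only [PySem.Chars.join, List.intercalate, List.intersperse, List.modifyHead] at *
          simpa using ih

-- rfind facts used only by the equivalence proof
lemma rgo_neg_one (s : List Char) (h : ' ' ∉ s) : ∀ k, PySem.Chars.rfind.go s [' '] k = -1 := by
  intro k
  induction k with
  | zero =>
    rw [rgo_zero]
    split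
    · next hp =>
      rw [prefix_space] at hp
      cases s with
      | nil => simp at hp
      | cons c r => simp_all
    · rfl
  | succ j ih =>
    rw [rgo_succ]
    split
    · next hp =>
      rw [prefix_space] at hp
      exact absurd (List.mem_of_mem_drop (List.mem_of_mem_head? hp)) h
    · exact ih

lemma rfind_space_neg_one (s : List Char) (h : ' ' ∉ s) : PySem.Chars.rfind s [' '] = -1 :=
  rgo_neg_one s h _

lemma rfind_space_concat (pre post : List Char) (h : ' ' ∉ post) :
    PySem.Chars.rfind (pre ++ ' ' :: post) [' '] = (pre.length : Int) := by
  have key : ∀ n, n ≤ post.length + 1 → PySem.Chars.rfind.go (pre ++ ' ' :: post) [' '] (pre.length + n) = (pre.length : Int) := by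
    intro n
    induction n with
    | zero =>
      intro _
      simp only [Nat.add_zero]
      cases hp : pre.length with
      | zero =>
        obtain rfl : pre = [] := List.eq_nil_of_length_eq_zero hp
        rw [rgo_zero, if_pos (by rw [prefix_space]; simp)]
        simp
      | succ j =>
        rw [rgo_succ, if_pos (by rw [prefix_space, ← hp, List.drop_left]; simp)]
        push_cast
        ring
    | succ m ih =>
      intro hm
      have : pre.length + (m+1) = (pre.length + m) + 1 := by omega
      rw [this, rgo_succ]
      have hd : (pre ++ ' ' :: post).drop (pre.length + m + 1) = post.drop m := by
        rw [show pre.length + m + 1 = pre.length + (m+1) by ring, List.drop_length_add_append]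
        simp
      rw [hd]
      have : ¬ ([' '].isPrefixOf (post.drop m) = true) := by
        rw [prefix_space]
        intro hp
        exact h (List.mem_of_mem_drop (List.mem_of_mem_head? hp))
      rw [if_neg this]
      exact ih (by omega)
  have hl : (pre ++ ' ' :: post).length = pre.length + (post.length + 1) := by simp
  show PySem.Chars.rfind.go _ [' '] (pre ++ ' ' :: post).length = _
  rw [hl]
  exact key (post.length + 1) le_rfl

-- strip / leading-whitespace facts
lemma nl_head (p : Char → Bool) (c : Char) (r : List Char) (h : List.dropWhile p (c :: r) = c :: r) : p c = false := by
  by_contra hb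
  have hbc : p c = true := by revert hb; cases p c <;> simp
  rw [List.dropWhile_cons, if_pos hbc] at h
  have h1 := congrArg List.length h
  have h2 := List.length_dropWhile_le p r
  simp only [List.length_cons] at h1
  omega

lemma nl_take (l : List Char) (n : Nat) (h : PySem.Chars.lstrip l = l) :
    PySem.Chars.lstrip (l.take n) = l.take n := by
  cases l with
  | nil => simp [PySem.Chars.lstrip]
  | cons c r =>
    have hc := nl_head _ c r h
    cases n with
    | zero => rfl
    | succ m => simp [PySem.Chars.lstrip, hc]

lemma nl_strip (l : List Char) : PySem.Chars.lstrip (PySem.Chars.strip l) = PySem.Chars.strip l := by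
  have h1 : PySem.Chars.lstrip (PySem.Chars.lstrip l) = PySem.Chars.lstrip l :=
    List.dropWhile_idempotent _ _
  have hp : PySem.Chars.rstrip (PySem.Chars.lstrip l) <+: PySem.Chars.lstrip l := by
    have := List.reverse_prefix.mpr (List.dropWhile_suffix (l := (PySem.Chars.lstrip l).reverse) PySem.Chars.isspace)
    simpa [PySem.Chars.rstrip] using this
  have hn := List.prefix_iff_eq_take.mp hp
  show PySem.Chars.lstrip (PySem.Chars.rstrip (PySem.Chars.lstrip l)) = PySem.Chars.rstrip (PySem.Chars.lstrip l)
  rw [hn]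
  exact nl_take _ _ h1

lemma rstrip_eq_single (l : List Char) (c : Char) (h : PySem.Chars.rstrip l = [c]) :
    ∃ ws, l = c :: ws ∧ ∀ x ∈ ws, PySem.Chars.isspace x = true := by
  have h' : List.dropWhile PySem.Chars.isspace l.reverse = [c] := by
    have := congrArg List.reverse h
    simpa [PySem.Chars.rstrip] using this
  have hsplit : l.reverse = List.takeWhile PySem.Chars.isspace l.reverse ++ [c] := by
    conv_lhs => rw [← List.takeWhile_append_dropWhile (p := PySem.Chars.isspace) (l := l.reverse)]
    rw [h']
  refine ⟨(List.takeWhile PySem.Chars.isspace l.reverse).reverse, ?_, ?_⟩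
  · have := congrArg List.reverse hsplit
    simpa using this
  · intro x hx
    exact List.mem_takeWhile_imp (List.mem_reverse.mp hx)

lemma rstrip_cons_spaces (c : Char) (ws : List Char) (hws : ∀ x ∈ ws, PySem.Chars.isspace x = true)
    (hc : PySem.Chars.isspace c = false) : PySem.Chars.rstrip (c :: ws) = [c] := by
  unfold PySem.Chars.rstrip
  have : List.dropWhile PySem.Chars.isspace (ws.reverse ++ [c]) = [c] := by
    rw [List.dropWhile_append]
    have he : List.dropWhile PySem.Chars.isspace ws.reverse = [] := by
      rw [List.dropWhile_eq_nil_iff]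
      intro x hx
      exact hws x (List.mem_reverse.mp hx)
    rw [he]
    simp [hc]
  simp only [List.reverse_cons]
  rw [this]
  rfl

-- A's char-by-char peeling of a lone single-letter word (plus trailing non-' ' whitespace) ends at []
lemma aLoopA_nil : aLoopA [] = [] := by
  rw [aLoopA]
  have : PySem.Chars.rfind ([] : List Char) [' '] = -1 := rfind_space_neg_one [] (by simp)
  rw [this]
  simp [PySem.Chars.strip, PySem.Chars.lstrip, PySem.Chars.rstrip, PySem.Chars.slice_eq_listSlice, PySem.List.slice]

lemma aLoopA_single : ∀ (n : Nat) (ws : List Char), ws.length ≤ n →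
    (∀ x ∈ ws, PySem.Chars.isspace x = true ∧ x ≠ ' ') →
    ∀ c, PySem.Chars.isspace c = false → aLoopA (c :: ws) = [] := by
  intro n
  induction n with
  | zero =>
    intro ws hlen hws c hc
    obtain rfl : ws = [] := List.eq_nil_of_length_eq_zero (by omega)
    rw [aLoopA]
    have hnm : ' ' ∉ [c] := by
      simp only [List.mem_singleton]
      intro he
      rw [← he] at hc
      simp [PySem.Chars.isspace] at hc
    rw [rfind_space_neg_one [c] hnm]
    have hslice : PySem.Chars.slice [c] (some (-1 + 1)) none = [c] := by
      rw [show (-1 : Int) + 1 = 0 by norm_num]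
      simp [PySem.Chars.slice_eq_listSlice]
    rw [hslice]
    have hstrip : PySem.Chars.strip [c] = [c] := by
      simp [PySem.Chars.strip, PySem.Chars.lstrip, hc]
      exact rstrip_cons_spaces c [] (by simp) hc
    rw [hstrip]
    simp only [List.length_singleton]
    have : PySem.Chars.slice [c] none (some (-1)) = [] := by
      simp [PySem.Chars.slice_eq_listSlice, PySem.List.slice_to_neg_one]
    rw [this]
    exact aLoopA_nil
  | succ m ih =>
    intro ws hlen hws c hc
    rw [aLoopA]
    have hnm : ' ' ∉ c :: ws := by
      simp only [List.mem_cons, not_or]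
      constructor
      · intro he
        rw [← he] at hc
        simp [PySem.Chars.isspace] at hc
      · intro hm
        exact (hws _ hm).2 rfl
    rw [rfind_space_neg_one _ hnm]
    have hslice : PySem.Chars.slice (c :: ws) (some (-1 + 1)) none = c :: ws := by
      rw [show (-1 : Int) + 1 = 0 by norm_num]
      simp [PySem.Chars.slice_eq_listSlice]
    rw [hslice]
    have hstrip : PySem.Chars.strip (c :: ws) = [c] := by
      simp only [PySem.Chars.strip, PySem.Chars.lstrip, List.dropWhile_cons, hc]
      simp only [Bool.false_eq_true, if_false]
      exact rstrip_cons_spaces c ws (fun x hx => (hws x hx).1) hc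
    rw [hstrip]
    simp only [List.length_singleton]
    have hdl : PySem.Chars.slice (c :: ws) none (some (-1)) = (c :: ws).dropLast := by
      simp [PySem.Chars.slice_eq_listSlice, PySem.List.slice_to_neg_one]
    rw [hdl]
    cases hwse : ws with
    | nil => exact aLoopA_nil
    | cons w ws' =>
      rw [← hwse]
      have hdrop : (c :: ws).dropLast = c :: ws.dropLast := by
        rw [hwse]
        simp
      rw [hdrop]
      apply ih ws.dropLast
      · have h3 : ws.dropLast.length + 1 = ws.length := by rw [hwse]; simp
        omega
      · intro x hx
        exact hws x (List.dropLast_subset _ hx)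
      · exact hc

lemma last_space_decomp (cs : List Char) (h : ' ' ∈ cs) :
    ∃ pre post, cs = pre ++ ' ' :: post ∧ ' ' ∉ post := by
  induction cs with
  | nil => simp at h
  | cons c r ih =>
    by_cases hr : ' ' ∈ r
    · obtain ⟨p, q, hq, hnq⟩ := ih hr
      exact ⟨c :: p, q, by simp [hq], hnq⟩
    · have hc : c = ' ' := by
        rcases List.mem_cons.mp h with h'|h'
        · exact h'.symm
        · exact absurd h' hr
      exact ⟨[], r, by simp [hc], hr⟩

lemma popLoop_nil : popLoop [] = [] := by
  rw [popLoop]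
  rfl

lemma popLoop_concat (ts : List (List Char)) (t : List Char) :
    popLoop (ts ++ [t]) = if (PySem.Chars.strip t).length = 1 then popLoop ts else ts ++ [t] := by
  rw [popLoop]
  split
  · next heq => rw [List.getLast?_concat] at heq; cases heq
  · next t' heq =>
    rw [List.getLast?_concat] at heq
    obtain rfl : t' = t := by injection heq with h'; exact h'.symm
    rw [List.dropLast_concat]

lemma join_singleton_list (l : List Char) : PySem.Chars.join [' '] [l] = l := by
  simp [PySem.Chars.join, List.intercalate]

-- THE MAIN LOOP EQUIVALENCE: on a string with no leading whitespace, A's rfind/slice loop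
-- computes the join of B's token-popping loop.
lemma loop_eq : ∀ (n : Nat) (cs : List Char), cs.length ≤ n → PySem.Chars.lstrip cs = cs →
    aLoopA cs = PySem.Chars.join [' '] (popLoop (splitSp cs)) := by
  intro n
  induction n with
  | zero =>
    intro cs hlen _
    obtain rfl : cs = [] := List.eq_nil_of_length_eq_zero (by omega)
    rw [aLoopA_nil]
    have h0 : splitSp [] = [[]] := rfl
    have hB : popLoop [[]] = [[]] := by
      have h1 := popLoop_concat [] []
      simpa [PySem.Chars.strip, PySem.Chars.lstrip, PySem.Chars.rstrip] using h1
    rw [h0, hB, join_singleton_list]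
  | succ m ih =>
    intro cs hlen hnl
    by_cases hsp : ' ' ∈ cs
    · obtain ⟨pre, post, rfl, hpost⟩ := last_space_decomp cs hsp
      rw [aLoopA, rfind_space_concat pre post hpost]
      have hsl : PySem.Chars.slice (pre ++ ' ' :: post) (some ((pre.length : Int) + 1)) none = post := by
        rw [show ((pre.length : Int) + 1) = ((pre.length + 1 : Nat) : Int) by push_cast; ring]
        simp only [PySem.Chars.slice_eq_listSlice, PySem.List.slice_from_natCast]
        rw [show pre.length + 1 = pre.length + 1 from rfl, List.drop_length_add_append]
        simp
      rw [hsl]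
      rw [splitSp_concat pre post hpost]
      by_cases hone : (PySem.Chars.strip post).length = 1
      · rw [dif_pos hone]
        have htk : PySem.Chars.slice (pre ++ ' ' :: post) none (some (pre.length : Int)) = pre := by
          simp only [PySem.Chars.slice_eq_listSlice, PySem.List.slice_to_natCast]
          exact List.take_left
        rw [htk]
        rw [popLoop_concat, if_pos hone]
        apply ih
        · have : (pre ++ ' ' :: post).length = pre.length + post.length + 1 := by simp; omega
          omega
        · have hpre : pre = (pre ++ ' ' :: post).take pre.length := List.take_left.symm
          rw [hpre]
          exact nl_take _ _ hnl
      · rw [dif_neg hone]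
        rw [popLoop_concat, if_neg hone]
        rw [← splitSp_concat pre post hpost, join_splitSp]
    · -- no space in cs
      rw [aLoopA, rfind_space_neg_one cs hsp]
      have hslice : PySem.Chars.slice cs (some (-1 + 1)) none = cs := by
        rw [show (-1 : Int) + 1 = 0 by norm_num]
        simp [PySem.Chars.slice_eq_listSlice]
      rw [hslice]
      rw [splitSp_no_space cs hsp]
      by_cases hone : (PySem.Chars.strip cs).length = 1
      · rw [dif_pos hone]
        -- cs = c :: ws with c non-space, ws trailing whitespace (none of it ' ')
        have hstrip : PySem.Chars.strip cs = PySem.Chars.rstrip cs := by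
          unfold PySem.Chars.strip
          rw [hnl]
        rw [hstrip] at hone
        obtain ⟨c, hc⟩ : ∃ c, PySem.Chars.rstrip cs = [c] := by
          cases h : PySem.Chars.rstrip cs with
          | nil => rw [h] at hone; simp at hone
          | cons a b =>
            rw [h] at hone
            simp at hone
            exact ⟨a, by rw [hone]⟩
        obtain ⟨ws, rfl, hws⟩ := rstrip_eq_single cs c hc
        have hcns : PySem.Chars.isspace c = false := nl_head _ c ws hnl
        have hws' : ∀ x ∈ ws, PySem.Chars.isspace x = true ∧ x ≠ ' ' := by
          intro x hx
          refine ⟨hws x hx, ?_⟩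
          intro he
          exact hsp (he ▸ List.mem_cons_of_mem _ hx)
        have hdl : PySem.Chars.slice (c :: ws) none (some (-1)) = (c :: ws).dropLast := by
          simp [PySem.Chars.slice_eq_listSlice, PySem.List.slice_to_neg_one]
        rw [hdl]
        -- A side: peels to []
        have hA : aLoopA ((c :: ws).dropLast) = [] := by
          cases hwse : ws with
          | nil => exact aLoopA_nil
          | cons w ws' =>
            rw [← hwse]
            have hdrop : (c :: ws).dropLast = c :: ws.dropLast := by
              rw [hwse]; simp
            rw [hdrop]
            exact aLoopA_single ws.dropLast.length ws.dropLast le_rfl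
              (fun x hx => hws' x (List.dropLast_subset _ hx)) c hcns
        rw [hA]
        -- B side: pops the single token and joins [] to []
        have hB : popLoop [c :: ws] = [] := by
          have h1 := popLoop_concat [] (c :: ws)
          rw [if_pos (by rw [hstrip, hc]; rfl)] at h1
          simpa [popLoop_nil] using h1
        rw [hB]
        rfl
      · rw [dif_neg hone]
        have hB : popLoop [cs] = [cs] := by
          have h1 := popLoop_concat [] cs
          rw [if_neg hone] at h1
          simpa using h1
        rw [hB, join_singleton_list]

-- ===== VERDICT (by name: the statement is the Claim_ definition above) =====
theorem blockNameFormatter_spec : Claim_equal_blockNameFormatter := by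
  intro value _
  unfold Spec_blockNameFormatter
  simp only [blockNameFormatter, blockNameFormatter_alt]
  rw [splitOn_space_eq]
  rw [loop_eq (PySem.Chars.strip value.toList).length _ le_rfl (nl_strip value.toList)]
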